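-- pv_equiv track=rewrite | github.com/Nubaeon/mdview | src/mdview/sequencerender.py | _nearest_lane
-- ===== SOURCE A (Python) =====
-- def _nearest_lane(col: int, lane_cols: list[int]) -> int | None:
--     """Find the nearest lane to a column position."""
--     best_idx = None
--     best_dist = float('inf')
--     for i, lc in enumerate(lane_cols):
--         dist = abs(col - lc)
--         if dist < best_dist and dist <= 3:  # within 3 chars of a lane
--             best_dist = dist
--             best_idx = i
--     return best_idx
-- ===== SOURCE B (Python) =====
-- def _nearest_lane(col: int, lane_cols: list[int]) -> int | None:
--     """Find the nearest lane to a column position."""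
--     cands = [(i, lc) for i, lc in enumerate(lane_cols) if abs(col - lc) <= 3]
--     if not cands:
--         return None
--     return min(cands, key=lambda p: abs(col - p[1]))[0]
-- ===== Notes on version B (the rewrite author's own statement) =====
-- stated objective: simpler
-- what changed: Replaces the fused argmin loop with explicit best_idx/best_dist state by a filter comprehension of in-range candidates followed by a library min with a distance key (first-minimal tie-break).
import Mathlib
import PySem

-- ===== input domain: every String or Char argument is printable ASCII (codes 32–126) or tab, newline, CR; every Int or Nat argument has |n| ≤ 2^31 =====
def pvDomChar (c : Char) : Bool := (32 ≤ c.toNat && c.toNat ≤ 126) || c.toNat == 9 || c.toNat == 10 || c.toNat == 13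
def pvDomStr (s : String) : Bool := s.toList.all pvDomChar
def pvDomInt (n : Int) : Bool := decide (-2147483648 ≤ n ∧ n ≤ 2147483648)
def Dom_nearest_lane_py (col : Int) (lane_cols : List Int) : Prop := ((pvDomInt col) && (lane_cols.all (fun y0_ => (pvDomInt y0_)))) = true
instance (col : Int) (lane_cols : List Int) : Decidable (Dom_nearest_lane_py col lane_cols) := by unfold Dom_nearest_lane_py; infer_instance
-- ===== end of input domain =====

-- B replaces A's fused argmin loop (best_idx/best_dist state) by a filter of in-range
-- candidates followed by a first-minimal min with a distance key; same cost, simpler.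

-- ===== PORT A =====
-- loop body of A; best_dist = float('inf') is modeled as Option Int with none = +inf
-- (exact here: every distance compared against it is an integer)
def pvStepA (col : Int) (st : Option Int × Option Int) (p : Int × Int) : Option Int × Option Int :=
  let dist : Int := |col - p.2|
  if ((match st.2 with | none => true | some d => decide (dist < d)) && decide (dist ≤ 3))
  then (some p.1, some dist) else st

def nearest_lane_py (col : Int) (lane_cols : List Int) : Option Int :=
  (List.foldl (pvStepA col) (none, none) (PySem.List.enumerate lane_cols)).1

-- ===== PORT B =====
-- cands = the filter below; min? [] = none gives Source B's empty-candidates None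
def nearest_lane_py_alt (col : Int) (lane_cols : List Int) : Option Int :=
  (PySem.List.min? ((PySem.List.enumerate lane_cols).filter (fun p => decide (|col - p.2| ≤ 3)))
    (fun p => |col - p.2|)).map (·.1)

-- ===== PRECONDITION & SPEC =====
def Spec_nearest_lane_py (col : Int) (lane_cols : List Int) (out : Option Int) : Prop := out = nearest_lane_py_alt col lane_cols
instance (col : Int) (lane_cols : List Int) (out : Option Int) : Decidable (Spec_nearest_lane_py col lane_cols out) := by unfold Spec_nearest_lane_py; infer_instance

-- ===== CLAIM (what is proved, stated in full; the proofs are below) =====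
def Claim_equal_nearest_lane_py : Prop := ∀ (col : Int) (lane_cols : List Int), Dom_nearest_lane_py col lane_cols → Spec_nearest_lane_py col lane_cols (nearest_lane_py col lane_cols)

-- ===== LEMMAS AND PROOFS =====

-- the foldl step hidden inside PySem.List.min? with the distance key
def pvStepM (col : Int) (acc : Option (Int × Int)) (x : Int × Int) : Option (Int × Int) :=
  match acc with
  | none => some x
  | some m => if |col - x.2| < |col - m.2| then some x else some m

theorem pv_min_eq_foldl (col : Int) (l : List (Int × Int)) :
    PySem.List.min? l (fun p => |col - p.2|) = List.foldl (pvStepM col) none l := by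
  unfold PySem.List.min?
  congr 1
  funext acc x
  cases acc <;> rfl

-- invariant linking A's loop state to min?'s foldl accumulator
def pvRel (col : Int) : Option Int × Option Int → Option (Int × Int) → Prop
  | (none, none), none => True
  | (some i, some d), some (j, lc) => i = j ∧ d = |col - lc|
  | _, _ => False

theorem pv_main (col : Int) (xs : List Int) : ∀ (s : Int)
    (st : Option Int × Option Int) (acc : Option (Int × Int)), pvRel col st acc →
    (List.foldl (pvStepA col) st (PySem.List.enumerate xs s)).1
    = (List.foldl (pvStepM col) acc
        ((PySem.List.enumerate xs s).filter (fun p => decide (|col - p.2| ≤ 3)))).map (·.1) := by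
  induction xs with
  | nil =>
    intro s st acc hrel
    simp only [PySem.List.enumerate, List.filter_nil, List.foldl_nil]
    match st, acc, hrel with
    | (none, none), none, _ => rfl
    | (some i, some d), some (j, lc), ⟨h1, h2⟩ => simp [h1]
  | cons x t ih =>
    intro s st acc hrel
    rw [PySem.List.enumerate_cons]
    by_cases hle : |col - x| ≤ 3
    · match st, acc, hrel with
      | (none, none), none, _ =>
        simp only [List.foldl_cons, List.filter_cons, hle, decide_true, if_true, pvStepA, pvStepM,
          Bool.and_true]
        exact ih (s + 1) (some s, some |col - x|) (some (s, x)) ⟨rfl, rfl⟩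
      | (some i, some d), some (j, lc), ⟨h1, h2⟩ =>
        subst h1 h2
        simp only [List.foldl_cons, List.filter_cons, hle, decide_true, if_true, pvStepA, pvStepM,
          Bool.and_true]
        by_cases hlt : |col - x| < |col - lc|
        · simp only [hlt, decide_true, if_true]
          exact ih (s + 1) (some s, some |col - x|) (some (s, x)) ⟨rfl, rfl⟩
        · simp only [hlt, decide_false, if_false]
          exact ih (s + 1) (some i, some |col - lc|) (some (i, lc)) ⟨rfl, rfl⟩
    · match st, acc, hrel with
      | (none, none), none, _ =>
        simp only [List.foldl_cons, List.filter_cons, hle, decide_false, pvStepA,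
          Bool.and_false, if_false]
        exact ih (s + 1) (none, none) none trivial
      | (some i, some d), some (j, lc), ⟨h1, h2⟩ =>
        subst h1 h2
        simp only [List.foldl_cons, List.filter_cons, hle, decide_false, pvStepA,
          Bool.and_false, if_false]
        exact ih (s + 1) (some i, some |col - lc|) (some (i, lc)) ⟨rfl, rfl⟩

-- ===== VERDICT (by name: the statement is the Claim_ definition above) =====
theorem nearest_lane_py_spec : Claim_equal_nearest_lane_py := by
  intro col lane_cols _
  unfold Spec_nearest_lane_py nearest_lane_py nearest_lane_py_alt
  rw [pv_min_eq_foldl]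
  exact pv_main col lane_cols 0 (none, none) none trivial
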